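-- pv_equiv track=rewrite | github.com/yusuf-ern/sva2sby | tools/sva_lower.py | mask_comments
-- ===== SOURCE A (Python) =====
-- def mask_comments(text: str) -> str:
--     chars = list(text)
--     index = 0
--     while index < len(chars):
--         if chars[index] == "/" and index + 1 < len(chars):
--             nxt = chars[index + 1]
--             if nxt == "/":
--                 chars[index] = " "
--                 chars[index + 1] = " "
--                 index += 2
--                 while index < len(chars) and chars[index] != "\n":
--                     chars[index] = " "
--                     index += 1
--                 continue
--             if nxt == "*":
--                 chars[index] = " "
--                 chars[index + 1] = " "
--                 index += 2
--                 while index + 1 < len(chars):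
--                     if chars[index] == "*" and chars[index + 1] == "/":
--                         chars[index] = " "
--                         chars[index + 1] = " "
--                         index += 2
--                         break
--                     if chars[index] != "\n":
--                         chars[index] = " "
--                     index += 1
--                 continue
--         index += 1
--     return "".join(chars)
-- ===== SOURCE B (Python) =====
-- def mask_comments(text: str) -> str:
--     # Single forward pass with a 5-state DFA (no index arithmetic, no lookahead):
--     # 0 = normal, 1 = normal after '/', 2 = line comment, 3 = block comment,
--     # 4 = block comment after '*'.  Pending '/' / '*' are emitted on state exit.
--     state = 0
--     out = []
--     for c in text:
--         if state == 0:
--             if c == "/":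
--                 state = 1
--             else:
--                 out.append(c)
--         elif state == 1:
--             if c == "/":
--                 out.append("  ")
--                 state = 2
--             elif c == "*":
--                 out.append("  ")
--                 state = 3
--             else:
--                 out.append("/" + c)
--                 state = 0
--         elif state == 2:
--             if c == "\n":
--                 out.append("\n")
--                 state = 0
--             else:
--                 out.append(" ")
--         elif state == 3:
--             if c == "*":
--                 state = 4
--             elif c == "\n":
--                 out.append("\n")
--             else:
--                 out.append(" ")
--         else:  # state 4
--             if c == "/":
--                 out.append("  ")
--                 state = 0
--             elif c == "*":
--                 out.append(" ")
--             elif c == "\n":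
--                 out.append(" \n")
--                 state = 3
--             else:
--                 out.append("  ")
--                 state = 3
--     if state == 1:
--         out.append("/")
--     elif state == 4:
--         out.append(" ")
--     return "".join(out)
-- ===== Notes on version B (the rewrite author's own statement) =====
-- stated objective: alternative
-- what changed: Replaced A's in-place char-array mutation with index jumps and nested inner while-loops by a single forward pass of a five-state DFA (normal / after-slash / line / block / block-after-star) that appends output chunks to a buffer joined once at the end, flushing a pending slash or star when the input ends.
-- intended difference: On texts that end inside an unterminated block comment whose final character is neither newline nor space, A returns that character unmasked (its inner loop insists on two characters of lookahead, an off-by-one only this degenerate input reaches) while B masks it to a space like the rest of the comment, which is the intended masking. — e.g. on mask_comments("/*x"): A returns " x", B returns " "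
import Mathlib
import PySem

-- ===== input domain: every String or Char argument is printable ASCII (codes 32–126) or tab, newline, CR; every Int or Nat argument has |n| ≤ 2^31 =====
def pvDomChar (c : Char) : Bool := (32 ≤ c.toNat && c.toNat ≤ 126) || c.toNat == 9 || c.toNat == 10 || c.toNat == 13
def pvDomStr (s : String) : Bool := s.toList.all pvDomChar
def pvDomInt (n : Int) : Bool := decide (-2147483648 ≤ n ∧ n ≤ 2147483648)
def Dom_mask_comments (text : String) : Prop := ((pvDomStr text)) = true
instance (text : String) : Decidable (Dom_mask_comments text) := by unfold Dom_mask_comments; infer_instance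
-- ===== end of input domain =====

-- B replaces A's in-place char-array mutation with index jumps and nested inner
-- while-loops by a single forward five-state DFA pass appending to an output buffer
-- (alternative decomposition, same cost); on a text ending inside an unterminated
-- block comment A leaves the very last character unmasked while B masks it —
-- stated as the intended difference D_ below.

-- ===== PORT A =====
-- A's while-loops, written with an exact structural fuel (chars.length - index:
-- the loops advance index by at least 1 per iteration, so this fuel is never
-- exhausted before the loop's own exit test fires; it only makes the recursion
-- structural so the kernel can evaluate it).  mcLineLoop_eq / mcBlockLoop_eq /
-- mcOuter_eq below restate each as its literal Python loop equation.

-- inner 'while index < len(chars) and chars[index] != "\n"' loop of A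
def mcLineLoopF : Nat → List Char → Nat → List Char × Nat
  | 0, chars, index => (chars, index)
  | fuel + 1, chars, index =>
    if index < chars.length then
      if chars.getD index ' ' ≠ '\n' then
        mcLineLoopF fuel (chars.set index ' ') (index + 1)
      else (chars, index)
    else (chars, index)

def mcLineLoop (chars : List Char) (index : Nat) : List Char × Nat :=
  mcLineLoopF (chars.length - index) chars index

-- inner 'while index + 1 < len(chars)' block-comment loop of A
def mcBlockLoopF : Nat → List Char → Nat → List Char × Nat
  | 0, chars, index => (chars, index)
  | fuel + 1, chars, index =>
    if index + 1 < chars.length then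
      if chars.getD index ' ' = '*' ∧ chars.getD (index + 1) ' ' = '/' then
        (((chars.set index ' ').set (index + 1) ' '), index + 2)
      else
        mcBlockLoopF fuel (if chars.getD index ' ' ≠ '\n' then chars.set index ' ' else chars) (index + 1)
    else (chars, index)

def mcBlockLoop (chars : List Char) (index : Nat) : List Char × Nat :=
  mcBlockLoopF (chars.length - index) chars index

-- outer while loop of A
def mcOuterF : Nat → List Char → Nat → List Char
  | 0, chars, _ => chars
  | fuel + 1, chars, index =>
    if index < chars.length then
      if chars.getD index ' ' = '/' ∧ index + 1 < chars.length then
        if chars.getD (index + 1) ' ' = '/' then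
          mcOuterF fuel (mcLineLoop ((chars.set index ' ').set (index + 1) ' ') (index + 2)).1
                        (mcLineLoop ((chars.set index ' ').set (index + 1) ' ') (index + 2)).2
        else if chars.getD (index + 1) ' ' = '*' then
          mcOuterF fuel (mcBlockLoop ((chars.set index ' ').set (index + 1) ' ') (index + 2)).1
                        (mcBlockLoop ((chars.set index ' ').set (index + 1) ' ') (index + 2)).2
        else mcOuterF fuel chars (index + 1)
      else mcOuterF fuel chars (index + 1)
    else chars

def mcOuter (chars : List Char) (index : Nat) : List Char :=
  mcOuterF (chars.length - index) chars index

-- '"".join(chars)' on a list of single characters is String.ofList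
def mask_comments (text : String) : String := String.ofList (mcOuter text.toList 0)

-- ===== PORT B =====
-- one DFA step of Source B's loop body: (state, char) ↦ (new state, emitted chars)
def mcStep (state : Nat) (c : Char) : Nat × List Char :=
  if state = 0 then
    (if c = '/' then (1, []) else (0, [c]))
  else if state = 1 then
    if c = '/' then (2, [' ', ' '])
    else if c = '*' then (3, [' ', ' '])
    else (0, ['/', c])
  else if state = 2 then
    (if c = '\n' then (0, ['\n']) else (2, [' ']))
  else if state = 3 then
    if c = '*' then (4, [])
    else if c = '\n' then (3, ['\n'])
    else (3, [' '])
  else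
    if c = '/' then (0, [' ', ' '])
    else if c = '*' then (4, [' '])
    else if c = '\n' then (3, [' ', '\n'])
    else (3, [' ', ' '])

-- the end-of-input flush of Source B
def mcFlush (state : Nat) : List Char :=
  if state = 1 then ['/'] else if state = 4 then [' '] else []

-- Source B's 'for c in text' loop accumulating the output
def mcRun (state : Nat) : List Char → List Char
  | [] => mcFlush state
  | c :: rest => (mcStep state c).2 ++ mcRun (mcStep state c).1 rest

def mask_comments_alt (text : String) : String := String.ofList (mcRun 0 text.toList)

-- ===== PRECONDITION & SPEC =====
-- comment-grammar scanner used only to state D_: mcGood cs = false exactly when cs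
-- ends inside an unterminated block comment whose final character is neither '\n' nor ' '
mutual
def mcGood : List Char → Bool
  | [] => true
  | c :: r =>
    if c = '/' then
      match r with
      | [] => true
      | d :: r' =>
        if d = '/' then mcGoodLine r'
        else if d = '*' then mcGoodBlock r'
        else mcGood (d :: r')
    else mcGood r
def mcGoodLine : List Char → Bool
  | [] => true
  | c :: r => if c = '\n' then mcGood r else mcGoodLine r
def mcGoodBlock : List Char → Bool
  | [] => true
  | c :: r =>
    if c = '*' then
      match r with
      | [] => false
      | d :: r' => if d = '/' then mcGood r' else mcGoodBlock (d :: r')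
    else if r.isEmpty then c = '\n' || c = ' '
    else mcGoodBlock r
end

-- On texts ending inside an unterminated block comment whose final character is neither
-- newline nor space, A returns it unmasked (its inner loop insists on two characters of
-- lookahead) while B masks it to a space like the rest of the comment, which is the
-- intended masking.
def D_mask_comments (text : String) : Prop := mcGood text.toList = false
instance (text : String) : Decidable (D_mask_comments text) := by unfold D_mask_comments; infer_instance

def Spec_mask_comments (text : String) (out : String) : Prop := ¬ D_mask_comments text → out = mask_comments_alt text
instance (text : String) (out : String) : Decidable (Spec_mask_comments text out) := by unfold Spec_mask_comments; infer_instance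

def pvDiffWitness_mask_comments : String := "/*x"
def pvDiffWitnessOut_mask_comments : String × String := ("  x", "   ")

-- ===== CLAIM (what is proved, stated in full; the proofs are below) =====
def Claim_unchanged_mask_comments : Prop := ∀ (text : String), Dom_mask_comments text → Spec_mask_comments text (mask_comments text)
def Claim_changed_mask_comments : Prop := Dom_mask_comments (pvDiffWitness_mask_comments) ∧ D_mask_comments (pvDiffWitness_mask_comments) ∧ mask_comments (pvDiffWitness_mask_comments) = pvDiffWitnessOut_mask_comments.1 ∧ mask_comments_alt (pvDiffWitness_mask_comments) = pvDiffWitnessOut_mask_comments.2 ∧ pvDiffWitnessOut_mask_comments.1 ≠ pvDiffWitnessOut_mask_comments.2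
def Claim_exact_mask_comments : Prop := ∀ (text : String), Dom_mask_comments text → D_mask_comments text → mask_comments text ≠ mask_comments_alt text

-- ===== LEMMAS AND PROOFS =====

-- unfolding equations and invariants for A's fuel-structured loops
theorem mcLineLoop_eq (chars : List Char) (index : Nat) :
    mcLineLoop chars index =
      if index < chars.length then
        if chars.getD index ' ' ≠ '\n' then
          mcLineLoop (chars.set index ' ') (index + 1)
        else (chars, index)
      else (chars, index) := by
  unfold mcLineLoop
  rcases h : chars.length - index with _ | n
  · rw [if_neg (by omega)]; rfl
  · have hlt : index < chars.length := by omega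
    have hn : (chars.set index ' ').length - (index + 1) = n := by simp; omega
    rw [mcLineLoopF, if_pos hlt, if_pos hlt, hn]

theorem mcLineLoopF_len (fuel : Nat) (chars : List Char) (index : Nat) :
    (mcLineLoopF fuel chars index).1.length = chars.length := by
  induction fuel generalizing chars index with
  | zero => rfl
  | succ fuel ih => rw [mcLineLoopF]; split <;> [skip; rfl]; split <;> first | simp [ih] | rfl

theorem mcLineLoopF_idx (fuel : Nat) (chars : List Char) (index : Nat) :
    index ≤ (mcLineLoopF fuel chars index).2 := by
  induction fuel generalizing chars index with
  | zero => exact le_rfl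
  | succ fuel ih =>
    rw [mcLineLoopF]
    split <;> [skip; simp]
    split <;> [exact le_trans (by omega) (ih _ _); simp]

theorem mcLineLoop_len (chars : List Char) (index : Nat) :
    (mcLineLoop chars index).1.length = chars.length := mcLineLoopF_len _ _ _

theorem mcLineLoop_idx (chars : List Char) (index : Nat) :
    index ≤ (mcLineLoop chars index).2 := mcLineLoopF_idx _ _ _

theorem mcBlockLoop_eq (chars : List Char) (index : Nat) :
    mcBlockLoop chars index =
      if index + 1 < chars.length then
        if chars.getD index ' ' = '*' ∧ chars.getD (index + 1) ' ' = '/' then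
          (((chars.set index ' ').set (index + 1) ' '), index + 2)
        else
          mcBlockLoop (if chars.getD index ' ' ≠ '\n' then chars.set index ' ' else chars) (index + 1)
      else (chars, index) := by
  unfold mcBlockLoop
  rcases h : chars.length - index with _ | n
  · rw [if_neg (by omega)]; rfl
  · rw [mcBlockLoopF]
    by_cases h1 : index + 1 < chars.length
    · rw [if_pos h1, if_pos h1]
      by_cases h2 : chars.getD index ' ' = '*' ∧ chars.getD (index + 1) ' ' = '/'
      · rw [if_pos h2, if_pos h2]
      · rw [if_neg h2, if_neg h2]
        have hn : (if chars.getD index ' ' ≠ '\n' then chars.set index ' ' else chars).length - (index + 1) = n := by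
          split <;> first | (simp; omega) | omega
        rw [hn]
    · rw [if_neg h1, if_neg h1]

theorem mcBlockLoopF_len (fuel : Nat) (chars : List Char) (index : Nat) :
    (mcBlockLoopF fuel chars index).1.length = chars.length := by
  induction fuel generalizing chars index with
  | zero => rfl
  | succ fuel ih =>
    rw [mcBlockLoopF]
    split <;> [skip; rfl]
    split
    · simp
    · rw [ih]; split <;> simp

theorem mcBlockLoopF_idx (fuel : Nat) (chars : List Char) (index : Nat) :
    index ≤ (mcBlockLoopF fuel chars index).2 := by
  induction fuel generalizing chars index with
  | zero => exact le_rfl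
  | succ fuel ih =>
    rw [mcBlockLoopF]
    split <;> [skip; simp]
    split
    · simp
    · exact le_trans (by omega) (ih _ _)

theorem mcBlockLoop_len (chars : List Char) (index : Nat) :
    (mcBlockLoop chars index).1.length = chars.length := mcBlockLoopF_len _ _ _

theorem mcBlockLoop_idx (chars : List Char) (index : Nat) :
    index ≤ (mcBlockLoop chars index).2 := mcBlockLoopF_idx _ _ _

-- the outer loop's result does not depend on the fuel once it covers length - index
theorem mcOuterF_congr : ∀ (f1 f2 : Nat) (chars : List Char) (index : Nat),
    chars.length - index ≤ f1 → chars.length - index ≤ f2 →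
    mcOuterF f1 chars index = mcOuterF f2 chars index := by
  intro f1
  induction f1 with
  | zero =>
    intro f2 chars index h1 h2
    rcases f2 with _ | f2
    · rfl
    · rw [mcOuterF, mcOuterF, if_neg (by omega)]
  | succ f1 ih =>
    intro f2 chars index h1 h2
    rcases f2 with _ | f2
    · rw [mcOuterF, mcOuterF, if_neg (by omega)]
    · rw [mcOuterF, mcOuterF]
      by_cases hl : index < chars.length
      · rw [if_pos hl, if_pos hl]
        by_cases hc : chars.getD index ' ' = '/' ∧ index + 1 < chars.length
        · rw [if_pos hc, if_pos hc]
          by_cases hs1 : chars.getD (index + 1) ' ' = '/'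
          · rw [if_pos hs1, if_pos hs1]
            have hL := mcLineLoop_len ((chars.set index ' ').set (index + 1) ' ') (index + 2)
            have hI := mcLineLoop_idx ((chars.set index ' ').set (index + 1) ' ') (index + 2)
            simp only [List.length_set] at hL
            exact ih _ _ _ (by omega) (by omega)
          · rw [if_neg hs1, if_neg hs1]
            by_cases hs2 : chars.getD (index + 1) ' ' = '*'
            · rw [if_pos hs2, if_pos hs2]
              have hL := mcBlockLoop_len ((chars.set index ' ').set (index + 1) ' ') (index + 2)
              have hI := mcBlockLoop_idx ((chars.set index ' ').set (index + 1) ' ') (index + 2)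
              simp only [List.length_set] at hL
              exact ih _ _ _ (by omega) (by omega)
            · rw [if_neg hs2, if_neg hs2]
              exact ih _ _ _ (by omega) (by omega)
        · rw [if_neg hc, if_neg hc]
          exact ih _ _ _ (by omega) (by omega)
      · rw [if_neg hl, if_neg hl]

theorem mcOuter_eq (chars : List Char) (index : Nat) :
    mcOuter chars index =
      if index < chars.length then
        if chars.getD index ' ' = '/' ∧ index + 1 < chars.length then
          if chars.getD (index + 1) ' ' = '/' then
            mcOuter (mcLineLoop ((chars.set index ' ').set (index + 1) ' ') (index + 2)).1
                    (mcLineLoop ((chars.set index ' ').set (index + 1) ' ') (index + 2)).2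
          else if chars.getD (index + 1) ' ' = '*' then
            mcOuter (mcBlockLoop ((chars.set index ' ').set (index + 1) ' ') (index + 2)).1
                    (mcBlockLoop ((chars.set index ' ').set (index + 1) ' ') (index + 2)).2
          else mcOuter chars (index + 1)
        else mcOuter chars (index + 1)
      else chars := by
  unfold mcOuter
  rcases h : chars.length - index with _ | n
  · rw [if_neg (by omega)]; rfl
  · rw [mcOuterF]
    by_cases hl : index < chars.length
    · rw [if_pos hl, if_pos hl]
      by_cases hc : chars.getD index ' ' = '/' ∧ index + 1 < chars.length
      · rw [if_pos hc, if_pos hc]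
        by_cases hs1 : chars.getD (index + 1) ' ' = '/'
        · rw [if_pos hs1, if_pos hs1]
          have hL := mcLineLoop_len ((chars.set index ' ').set (index + 1) ' ') (index + 2)
          have hI := mcLineLoop_idx ((chars.set index ' ').set (index + 1) ' ') (index + 2)
          simp only [List.length_set] at hL
          exact mcOuterF_congr _ _ _ _ (by omega) (by omega)
        · rw [if_neg hs1, if_neg hs1]
          by_cases hs2 : chars.getD (index + 1) ' ' = '*'
          · rw [if_pos hs2, if_pos hs2]
            have hL := mcBlockLoop_len ((chars.set index ' ').set (index + 1) ' ') (index + 2)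
            have hI := mcBlockLoop_idx ((chars.set index ' ').set (index + 1) ' ') (index + 2)
            simp only [List.length_set] at hL
            exact mcOuterF_congr _ _ _ _ (by omega) (by omega)
          · rw [if_neg hs2, if_neg hs2]
            exact mcOuterF_congr _ _ _ _ (by omega) (by omega)
      · rw [if_neg hc, if_neg hc]
        exact mcOuterF_congr _ _ _ _ (by omega) (by omega)
    · rw [if_neg hl, if_neg hl]


-- common reference form of the masking (B's semantics as suffix recursion)
mutual
def refN : List Char → List Char
  | [] => []
  | c :: r =>
    if c = '/' then
      match r with
      | [] => ['/']
      | d :: r' =>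
        if d = '/' then ' ' :: ' ' :: refL r'
        else if d = '*' then ' ' :: ' ' :: refB r'
        else '/' :: refN (d :: r')
    else c :: refN r
def refL : List Char → List Char
  | [] => []
  | c :: r => if c = '\n' then '\n' :: refN r else ' ' :: refL r
def refB : List Char → List Char
  | [] => []
  | c :: r =>
    if c = '*' then
      match r with
      | [] => [' ']
      | d :: r' => if d = '/' then ' ' :: ' ' :: refN r' else ' ' :: refB (d :: r')
    else
      (if c = '\n' then '\n' else ' ') :: refB r
end


theorem refN_nil : refN [] = [] := by rw [refN.eq_def]
theorem refN_slash_nil : refN ['/'] = ['/'] := by rw [refN.eq_def]; simp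
theorem refN_line (r : List Char) : refN ('/' :: '/' :: r) = ' ' :: ' ' :: refL r := by
  rw [refN.eq_def]; simp
theorem refN_block (r : List Char) : refN ('/' :: '*' :: r) = ' ' :: ' ' :: refB r := by
  rw [refN.eq_def]; simp
theorem refN_slash_other (d : Char) (r : List Char) (h1 : d ≠ '/') (h2 : d ≠ '*') :
    refN ('/' :: d :: r) = '/' :: refN (d :: r) := by
  rw [refN.eq_def]; simp [h1, h2]
theorem refN_other (c : Char) (r : List Char) (h : c ≠ '/') : refN (c :: r) = c :: refN r := by
  rw [refN.eq_def]; simp [h]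
theorem refL_nil : refL [] = [] := by rw [refL.eq_def]
theorem refL_nl (r : List Char) : refL ('\n' :: r) = '\n' :: refN r := by rw [refL.eq_def]; simp
theorem refL_other (c : Char) (r : List Char) (h : c ≠ '\n') : refL (c :: r) = ' ' :: refL r := by
  rw [refL.eq_def]; simp [h]
theorem refB_nil : refB [] = [] := by rw [refB.eq_def]
theorem refB_star_nil : refB ['*'] = [' '] := by rw [refB.eq_def]; simp
theorem refB_term (r : List Char) : refB ('*' :: '/' :: r) = ' ' :: ' ' :: refN r := by
  rw [refB.eq_def]; simp
theorem refB_star_other (d : Char) (r : List Char) (h : d ≠ '/') :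
    refB ('*' :: d :: r) = ' ' :: refB (d :: r) := by
  rw [refB.eq_def]; simp [h]
theorem refB_other (c : Char) (r : List Char) (h : c ≠ '*') :
    refB (c :: r) = (if c = '\n' then '\n' else ' ') :: refB r := by
  rw [refB.eq_def]; simp [h]

theorem mcRun_eq_ref (cs : List Char) :
    mcRun 0 cs = refN cs ∧ mcRun 1 cs = refN ('/' :: cs) ∧ mcRun 2 cs = refL cs ∧
    mcRun 3 cs = refB cs ∧ mcRun 4 cs = refB ('*' :: cs) := by
  induction cs with
  | nil =>
    refine ⟨?_, ?_, ?_, ?_, ?_⟩ <;>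
      simp [mcRun, mcFlush, refN_nil, refN_slash_nil, refL_nil, refB_nil, refB_star_nil]
  | cons c r ih =>
    obtain ⟨ih0, ih1, ih2, ih3, ih4⟩ := ih
    refine ⟨?_, ?_, ?_, ?_, ?_⟩ <;>
      by_cases h1 : c = '/' <;> by_cases h2 : c = '*' <;> by_cases h3 : c = '\n' <;>
        simp_all [mcRun, mcStep, refN_line, refN_block, refN_slash_nil, refN_slash_other,
          refN_other, refL_nl, refL_other, refB_term, refB_star_other, refB_other]

theorem getDApp (p : List Char) (c x : Char) (r : List Char) :
    (p ++ c :: r).getD p.length x = c := by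
  induction p with
  | nil => rfl
  | cons a p ih => simpa using ih

theorem setApp (p : List Char) (c x : Char) (r : List Char) :
    (p ++ c :: r).set p.length x = p ++ x :: r := by
  induction p with
  | nil => rfl
  | cons a p ih => simpa using ih

theorem getDApp1 (p : List Char) (c d x : Char) (r : List Char) :
    (p ++ c :: d :: r).getD (p.length + 1) x = d := by
  have := getDApp (p ++ [c]) d x r
  simpa using this

theorem setApp1 (p : List Char) (c d x : Char) (r : List Char) :
    (p ++ c :: d :: r).set (p.length + 1) x = p ++ c :: x :: r := by
  have := setApp (p ++ [c]) d x r
  simpa using this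


theorem good_nil : mcGood [] = true := by rw [mcGood.eq_def]
theorem good_slash_nil : mcGood ['/'] = true := by rw [mcGood.eq_def]; simp
theorem goodL_nil : mcGoodLine [] = true := by rw [mcGoodLine.eq_def]
theorem goodB_nil : mcGoodBlock [] = true := by rw [mcGoodBlock.eq_def]
theorem good_other (c : Char) (r : List Char) (h : c ≠ '/') : mcGood (c :: r) = mcGood r := by
  rw [mcGood.eq_def]; simp [h]
theorem good_line (r : List Char) : mcGood ('/' :: '/' :: r) = mcGoodLine r := by
  rw [mcGood.eq_def]; simp
theorem good_block (r : List Char) : mcGood ('/' :: '*' :: r) = mcGoodBlock r := by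
  rw [mcGood.eq_def]; simp
theorem good_slash_other (d : Char) (r : List Char) (h1 : d ≠ '/') (h2 : d ≠ '*') :
    mcGood ('/' :: d :: r) = mcGood (d :: r) := by
  rw [mcGood.eq_def]; simp [h1, h2]
theorem goodL_nl (r : List Char) : mcGoodLine ('\n' :: r) = mcGood r := by
  rw [mcGoodLine.eq_def]; simp
theorem goodL_other (c : Char) (r : List Char) (h : c ≠ '\n') :
    mcGoodLine (c :: r) = mcGoodLine r := by
  rw [mcGoodLine.eq_def]; simp [h]
theorem goodB_single (c : Char) : mcGoodBlock [c] = (c = '\n' || c = ' ') := by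
  by_cases h : c = '*'
  · subst h; rw [mcGoodBlock.eq_def]; simp
  · rw [mcGoodBlock.eq_def]; simp [h]
theorem goodB_term (r : List Char) : mcGoodBlock ('*' :: '/' :: r) = mcGood r := by
  rw [mcGoodBlock.eq_def]; simp
theorem goodB_cons (c d : Char) (r : List Char) (h : ¬(c = '*' ∧ d = '/')) :
    mcGoodBlock (c :: d :: r) = mcGoodBlock (d :: r) := by
  by_cases hc : c = '*'
  · subst hc
    have hd : d ≠ '/' := fun hd => h ⟨rfl, hd⟩
    rw [mcGoodBlock.eq_def]; simp [hd]
  · rw [mcGoodBlock.eq_def]; simp [hc]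

theorem outer_stop (p : List Char) : mcOuter p p.length = p := by
  rw [mcOuter_eq, if_neg (by omega)]

theorem mainEquiv : ∀ (n : Nat) (s : List Char), s.length ≤ n →
    (mcGood s = true → ∀ p : List Char, mcOuter (p ++ s) p.length = p ++ refN s) ∧
    (mcGoodLine s = true → ∀ p : List Char,
      mcOuter (mcLineLoop (p ++ s) p.length).1 (mcLineLoop (p ++ s) p.length).2 = p ++ refL s) ∧
    (mcGoodBlock s = true → ∀ p : List Char,
      mcOuter (mcBlockLoop (p ++ s) p.length).1 (mcBlockLoop (p ++ s) p.length).2 = p ++ refB s) := by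
  intro n
  induction n with
  | zero =>
    intro s hs
    have hnil : s = [] := by cases s <;> simp_all
    subst hnil
    refine ⟨fun _ p => ?_, fun _ p => ?_, fun _ p => ?_⟩
    · simp [outer_stop, refN_nil]
    · rw [mcLineLoop_eq, if_neg (by simp)]; simp [outer_stop, refL_nil]
    · rw [mcBlockLoop_eq, if_neg (by simp)]; simp [outer_stop, refB_nil]
  | succ n ih =>
    intro s hs
    refine ⟨?_, ?_, ?_⟩
    -- ===== good component: the outer loop from a normal position =====
    · intro hg p
      match s, hs, hg with
      | [], hs, hg => simp [outer_stop, refN_nil]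
      | c :: r, hs, hg =>
        by_cases hc : c = '/'
        · subst hc
          match r, hs, hg with
          | [], hs, hg =>
            rw [mcOuter_eq, if_pos (by simp), if_neg (by simp [getDApp])]
            have h5 := (ih [] (by simp)).1 good_nil (p ++ ['/'])
            simp only [List.append_assoc, List.cons_append, List.nil_append, List.append_nil,
              List.length_append, List.length_cons, List.length_nil, refN_nil] at h5
            rw [h5, refN_slash_nil]
          | d :: r', hs, hg =>
            by_cases hd : d = '/'
            · subst hd
              rw [mcOuter_eq, if_pos (by simp), if_pos (by constructor <;> simp [getDApp]),
                if_pos (by simp [getDApp1]), setApp, setApp1]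
              have hgl : mcGoodLine r' = true := by rwa [good_line] at hg
              have h5 := (ih r' (by simp at hs ⊢; omega)).2.1 hgl (p ++ [' ', ' '])
              simp only [List.append_assoc, List.cons_append, List.nil_append,
                List.length_append, List.length_cons, List.length_nil] at h5
              rw [h5, refN_line]
            · by_cases hd2 : d = '*'
              · subst hd2
                rw [mcOuter_eq, if_pos (by simp), if_pos (by constructor <;> simp [getDApp]),
                  if_neg (by simp [getDApp1]), if_pos (by simp [getDApp1]), setApp, setApp1]
                have hgb : mcGoodBlock r' = true := by rwa [good_block] at hg
                have h5 := (ih r' (by simp at hs ⊢; omega)).2.2 hgb (p ++ [' ', ' '])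
                simp only [List.append_assoc, List.cons_append, List.nil_append,
                  List.length_append, List.length_cons, List.length_nil] at h5
                rw [h5, refN_block]
              · rw [mcOuter_eq, if_pos (by simp), if_pos (by constructor <;> simp [getDApp]),
                  if_neg (by simp [getDApp1, hd]), if_neg (by simp [getDApp1, hd2])]
                have hg' : mcGood (d :: r') = true := by rwa [good_slash_other d r' hd hd2] at hg
                have h5 := (ih (d :: r') (by simp at hs ⊢; omega)).1 hg' (p ++ ['/'])
                simp only [List.append_assoc, List.cons_append, List.nil_append,
                  List.length_append, List.length_cons, List.length_nil] at h5
                rw [h5, refN_slash_other d r' hd hd2]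
        · rw [mcOuter_eq, if_pos (by simp), if_neg (by simp [getDApp, hc])]
          have hg' : mcGood r = true := by rwa [good_other c r hc] at hg
          have h5 := (ih r (by simp at hs ⊢; omega)).1 hg' (p ++ [c])
          simp only [List.append_assoc, List.cons_append, List.nil_append,
            List.length_append, List.length_cons, List.length_nil] at h5
          rw [h5, refN_other c r hc]
    -- ===== line component: A's inner line loop, then the outer loop resumes =====
    · intro hg p
      match s, hs, hg with
      | [], hs, hg =>
        rw [mcLineLoop_eq, if_neg (by simp)]; simp [outer_stop, refL_nil]
      | c :: r, hs, hg =>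
        by_cases hc : c = '\n'
        · subst hc
          rw [mcLineLoop_eq, if_pos (by simp), if_neg (by simp [getDApp])]
          simp only
          rw [mcOuter_eq, if_pos (by simp), if_neg (by simp [getDApp])]
          have hg' : mcGood r = true := by rwa [goodL_nl] at hg
          have h5 := (ih r (by simp at hs ⊢; omega)).1 hg' (p ++ ['\n'])
          simp only [List.append_assoc, List.cons_append, List.nil_append,
            List.length_append, List.length_cons, List.length_nil] at h5
          rw [h5, refL_nl]
        · rw [mcLineLoop_eq, if_pos (by simp), if_pos (by simp [getDApp, hc]), setApp]
          have hg' : mcGoodLine r = true := by rwa [goodL_other c r hc] at hg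
          have h5 := (ih r (by simp at hs ⊢; omega)).2.1 hg' (p ++ [' '])
          simp only [List.append_assoc, List.cons_append, List.nil_append,
            List.length_append, List.length_cons, List.length_nil] at h5
          rw [h5, refL_other c r hc]
    -- ===== block component: A's inner block loop, then the outer loop resumes =====
    · intro hg p
      match s, hs, hg with
      | [], hs, hg =>
        rw [mcBlockLoop_eq, if_neg (by simp)]; simp [outer_stop, refB_nil]
      | [c], hs, hg =>
        rw [mcBlockLoop_eq, if_neg (by simp)]
        simp only
        rw [goodB_single] at hg
        have hor : c = '\n' ∨ c = ' ' := by
          rcases Bool.or_eq_true_iff.mp hg with h | h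
          · exact Or.inl (by simpa using h)
          · exact Or.inr (by simpa using h)
        have hc : c ≠ '/' := by rcases hor with h | h <;> subst h <;> decide
        rw [mcOuter_eq, if_pos (by simp), if_neg (by simp [getDApp, hc])]
        have h5 := (ih [] (by simp)).1 good_nil (p ++ [c])
        simp only [List.append_assoc, List.cons_append, List.nil_append, List.append_nil,
          List.length_append, List.length_cons, List.length_nil, refN_nil] at h5
        rw [h5]
        rcases hor with h | h <;> subst h
        · rw [refB_other _ _ (by decide)]; simp [refB_nil]
        · rw [refB_other _ _ (by decide)]; simp [refB_nil]
      | c :: d :: r', hs, hg =>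
        by_cases hcd : c = '*' ∧ d = '/'
        · obtain ⟨hc, hd⟩ := hcd; subst hc; subst hd
          rw [mcBlockLoop_eq, if_pos (by simp),
            if_pos (by constructor <;> simp [getDApp, getDApp1]), setApp, setApp1]
          simp only
          have hg' : mcGood r' = true := by rwa [goodB_term] at hg
          have h5 := (ih r' (by simp at hs ⊢; omega)).1 hg' (p ++ [' ', ' '])
          simp only [List.append_assoc, List.cons_append, List.nil_append,
            List.length_append, List.length_cons, List.length_nil] at h5
          rw [h5, refB_term]
        · rw [mcBlockLoop_eq, if_pos (by simp),
            if_neg (by simp only [getDApp, getDApp1]; exact hcd)]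
          have hg' : mcGoodBlock (d :: r') = true := by rwa [goodB_cons c d r' hcd] at hg
          by_cases hc : c = '\n'
          · subst hc
            rw [if_neg (by simp [getDApp])]
            have h5 := (ih (d :: r') (by simp at hs ⊢; omega)).2.2 hg' (p ++ ['\n'])
            simp only [List.append_assoc, List.cons_append, List.nil_append,
              List.length_append, List.length_cons, List.length_nil] at h5
            rw [h5, refB_other '\n' (d :: r') (by decide)]; simp
          · rw [if_pos (by simp [getDApp, hc]), setApp]
            have h5 := (ih (d :: r') (by simp at hs ⊢; omega)).2.2 hg' (p ++ [' '])
            simp only [List.append_assoc, List.cons_append, List.nil_append,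
              List.length_append, List.length_cons, List.length_nil] at h5
            rw [h5]
            by_cases hstar : c = '*'
            · subst hstar
              have hd : d ≠ '/' := by intro hx; exact hcd ⟨rfl, hx⟩
              rw [refB_star_other d r' hd]
            · rw [refB_other c (d :: r') hstar, if_neg hc]


-- last-character bookkeeping for the tightness proof
theorem lastApp (p l : List Char) (h : l ≠ []) : (p ++ l).getLast? = l.getLast? :=
  List.getLast?_append_of_ne_nil p h

theorem lastCons (c : Char) (l : List Char) (h : l ≠ []) : (c :: l).getLast? = l.getLast? := by
  have := List.getLast?_append_of_ne_nil (l₁ := [c]) h; simpa using this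

theorem neNil_of_last {l : List Char} {x : Char} (h : l.getLast? = some x) : l ≠ [] := by
  intro hn; subst hn; simp at h

-- inside the bad region A's output ends in the text's own last character while the
-- reference output (= B) ends in a space distinct from it
theorem mainDiff : ∀ (n : Nat) (s : List Char), s.length ≤ n →
    (mcGood s = false → ∀ p : List Char,
      (mcOuter (p ++ s) p.length).getLast? = s.getLast? ∧ (refN s).getLast? = some ' ' ∧
      ∀ c, s.getLast? = some c → c ≠ ' ') ∧
    (mcGoodLine s = false → ∀ p : List Char,
      (mcOuter (mcLineLoop (p ++ s) p.length).1 (mcLineLoop (p ++ s) p.length).2).getLast? = s.getLast? ∧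
      (refL s).getLast? = some ' ' ∧ ∀ c, s.getLast? = some c → c ≠ ' ') ∧
    (mcGoodBlock s = false → ∀ p : List Char,
      (mcOuter (mcBlockLoop (p ++ s) p.length).1 (mcBlockLoop (p ++ s) p.length).2).getLast? = s.getLast? ∧
      (refB s).getLast? = some ' ' ∧ ∀ c, s.getLast? = some c → c ≠ ' ') := by
  intro n
  induction n with
  | zero =>
    intro s hs
    have hnil : s = [] := by cases s <;> simp_all
    subst hnil
    refine ⟨fun hg => ?_, fun hg => ?_, fun hg => ?_⟩
    · rw [good_nil] at hg; cases hg
    · rw [goodL_nil] at hg; cases hg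
    · rw [goodB_nil] at hg; cases hg
  | succ n ih =>
    intro s hs
    refine ⟨?_, ?_, ?_⟩
    -- good component
    · intro hg p
      match s, hs, hg with
      | [], hs, hg => rw [good_nil] at hg; cases hg
      | c :: r, hs, hg =>
        by_cases hc : c = '/'
        · subst hc
          match r, hs, hg with
          | [], hs, hg => rw [good_slash_nil] at hg; cases hg
          | d :: r', hs, hg =>
            by_cases hd : d = '/'
            · subst hd
              rw [mcOuter_eq, if_pos (by simp), if_pos (by constructor <;> simp [getDApp]),
                if_pos (by simp [getDApp1]), setApp, setApp1]
              have hgl : mcGoodLine r' = false := by rwa [good_line] at hg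
              obtain ⟨hA, hB, hC⟩ := (ih r' (by simp at hs ⊢; omega)).2.1 hgl (p ++ [' ', ' '])
              simp only [List.append_assoc, List.cons_append, List.nil_append,
                List.length_append, List.length_cons, List.length_nil] at hA
              have hrne : r' ≠ [] := by
                intro hx; subst hx; rw [goodL_nil] at hgl; cases hgl
              refine ⟨?_, ?_, ?_⟩
              · rw [hA, lastCons _ _ (by simp), lastCons _ _ hrne]
              · rw [refN_line, lastCons _ _ (neNil_of_last (lastCons _ _ (neNil_of_last hB) ▸ hB)),
                  lastCons _ _ (neNil_of_last hB)]
                exact hB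
              · rw [lastCons _ _ (by simp), lastCons _ _ hrne]; exact hC
            · by_cases hd2 : d = '*'
              · subst hd2
                rw [mcOuter_eq, if_pos (by simp), if_pos (by constructor <;> simp [getDApp]),
                  if_neg (by simp [getDApp1]), if_pos (by simp [getDApp1]), setApp, setApp1]
                have hgb : mcGoodBlock r' = false := by rwa [good_block] at hg
                obtain ⟨hA, hB, hC⟩ := (ih r' (by simp at hs ⊢; omega)).2.2 hgb (p ++ [' ', ' '])
                simp only [List.append_assoc, List.cons_append, List.nil_append,
                  List.length_append, List.length_cons, List.length_nil] at hA
                have hrne : r' ≠ [] := by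
                  intro hx; subst hx; rw [goodB_nil] at hgb; cases hgb
                refine ⟨?_, ?_, ?_⟩
                · rw [hA, lastCons _ _ (by simp), lastCons _ _ hrne]
                · rw [refN_block, lastCons _ _ (neNil_of_last (lastCons _ _ (neNil_of_last hB) ▸ hB)),
                    lastCons _ _ (neNil_of_last hB)]
                  exact hB
                · rw [lastCons _ _ (by simp), lastCons _ _ hrne]; exact hC
              · rw [mcOuter_eq, if_pos (by simp), if_pos (by constructor <;> simp [getDApp]),
                  if_neg (by simp [getDApp1, hd]), if_neg (by simp [getDApp1, hd2])]
                have hg' : mcGood (d :: r') = false := by rwa [good_slash_other d r' hd hd2] at hg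
                obtain ⟨hA, hB, hC⟩ := (ih (d :: r') (by simp at hs ⊢; omega)).1 hg' (p ++ ['/'])
                simp only [List.append_assoc, List.cons_append, List.nil_append,
                  List.length_append, List.length_cons, List.length_nil] at hA
                refine ⟨?_, ?_, ?_⟩
                · rw [hA, lastCons '/' (d :: r') (by simp)]
                · rw [refN_slash_other d r' hd hd2, lastCons _ _ (neNil_of_last hB)]; exact hB
                · rw [lastCons _ _ (by simp)]; exact hC
        · rw [mcOuter_eq, if_pos (by simp), if_neg (by simp [getDApp, hc])]
          have hg' : mcGood r = false := by rwa [good_other c r hc] at hg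
          obtain ⟨hA, hB, hC⟩ := (ih r (by simp at hs ⊢; omega)).1 hg' (p ++ [c])
          simp only [List.append_assoc, List.cons_append, List.nil_append,
            List.length_append, List.length_cons, List.length_nil] at hA
          have hrne : r ≠ [] := by
            intro hx; subst hx; rw [good_nil] at hg'; cases hg'
          refine ⟨?_, ?_, ?_⟩
          · rw [hA, lastCons _ _ hrne]
          · rw [refN_other c r hc, lastCons _ _ (neNil_of_last hB)]; exact hB
          · rw [lastCons _ _ hrne]; exact hC
    -- line component
    · intro hg p
      match s, hs, hg with
      | [], hs, hg => rw [goodL_nil] at hg; cases hg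
      | c :: r, hs, hg =>
        by_cases hc : c = '\n'
        · subst hc
          rw [mcLineLoop_eq, if_pos (by simp), if_neg (by simp [getDApp])]
          simp only
          rw [mcOuter_eq, if_pos (by simp), if_neg (by simp [getDApp])]
          have hg' : mcGood r = false := by rwa [goodL_nl] at hg
          obtain ⟨hA, hB, hC⟩ := (ih r (by simp at hs ⊢; omega)).1 hg' (p ++ ['\n'])
          simp only [List.append_assoc, List.cons_append, List.nil_append,
            List.length_append, List.length_cons, List.length_nil] at hA
          have hrne : r ≠ [] := by
            intro hx; subst hx; rw [good_nil] at hg'; cases hg'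
          refine ⟨?_, ?_, ?_⟩
          · rw [hA, lastCons _ _ hrne]
          · rw [refL_nl, lastCons _ _ (neNil_of_last hB)]; exact hB
          · rw [lastCons _ _ hrne]; exact hC
        · rw [mcLineLoop_eq, if_pos (by simp), if_pos (by simp [getDApp, hc]), setApp]
          have hg' : mcGoodLine r = false := by rwa [goodL_other c r hc] at hg
          obtain ⟨hA, hB, hC⟩ := (ih r (by simp at hs ⊢; omega)).2.1 hg' (p ++ [' '])
          simp only [List.append_assoc, List.cons_append, List.nil_append,
            List.length_append, List.length_cons, List.length_nil] at hA
          have hrne : r ≠ [] := by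
            intro hx; subst hx; rw [goodL_nil] at hg'; cases hg'
          refine ⟨?_, ?_, ?_⟩
          · rw [hA, lastCons _ _ hrne]
          · rw [refL_other c r hc, lastCons _ _ (neNil_of_last hB)]; exact hB
          · rw [lastCons _ _ hrne]; exact hC
    -- block component
    · intro hg p
      match s, hs, hg with
      | [], hs, hg => rw [goodB_nil] at hg; cases hg
      | [c], hs, hg =>
        rw [goodB_single] at hg
        have hc1 : c ≠ '\n' := by intro hx; subst hx; simp at hg
        have hc2 : c ≠ ' ' := by intro hx; subst hx; simp at hg
        rw [mcBlockLoop_eq, if_neg (by simp)]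
        simp only
        rw [mcOuter_eq, if_pos (by simp), if_neg (by simp [getDApp])]
        rw [mcOuter_eq, if_neg (by simp)]
        refine ⟨?_, ?_, ?_⟩
        · rw [lastApp p [c] (by simp)]
        · by_cases hstar : c = '*'
          · subst hstar; rw [refB_star_nil]; rfl
          · rw [refB_other c [] hstar, if_neg hc1, refB_nil]; rfl
        · intro c' hc'; simp at hc'; subst hc'; exact hc2
      | c :: d :: r', hs, hg =>
        by_cases hcd : c = '*' ∧ d = '/'
        · obtain ⟨hc, hd⟩ := hcd; subst hc; subst hd
          rw [mcBlockLoop_eq, if_pos (by simp),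
            if_pos (by constructor <;> simp [getDApp, getDApp1]), setApp, setApp1]
          simp only
          have hg' : mcGood r' = false := by rwa [goodB_term] at hg
          obtain ⟨hA, hB, hC⟩ := (ih r' (by simp at hs ⊢; omega)).1 hg' (p ++ [' ', ' '])
          simp only [List.append_assoc, List.cons_append, List.nil_append,
            List.length_append, List.length_cons, List.length_nil] at hA
          have hrne : r' ≠ [] := by
            intro hx; subst hx; rw [good_nil] at hg'; cases hg'
          refine ⟨?_, ?_, ?_⟩
          · rw [hA, lastCons _ _ (by simp), lastCons _ _ hrne]
          · rw [refB_term, lastCons _ _ (neNil_of_last (lastCons _ _ (neNil_of_last hB) ▸ hB)),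
              lastCons _ _ (neNil_of_last hB)]
            exact hB
          · rw [lastCons _ _ (by simp), lastCons _ _ hrne]; exact hC
        · rw [mcBlockLoop_eq, if_pos (by simp),
            if_neg (by simp only [getDApp, getDApp1]; exact hcd)]
          have hg' : mcGoodBlock (d :: r') = false := by rwa [goodB_cons c d r' hcd] at hg
          by_cases hc : c = '\n'
          · subst hc
            rw [if_neg (by simp [getDApp])]
            obtain ⟨hA, hB, hC⟩ := (ih (d :: r') (by simp at hs ⊢; omega)).2.2 hg' (p ++ ['\n'])
            simp only [List.append_assoc, List.cons_append, List.nil_append,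
              List.length_append, List.length_cons, List.length_nil] at hA
            refine ⟨?_, ?_, ?_⟩
            · rw [hA, lastCons '\n' (d :: r') (by simp)]
            · rw [refB_other '\n' (d :: r') (by decide), lastCons _ _ (neNil_of_last hB)]
              exact hB
            · rw [lastCons _ _ (by simp)]; exact hC
          · rw [if_pos (by simp [getDApp, hc]), setApp]
            obtain ⟨hA, hB, hC⟩ := (ih (d :: r') (by simp at hs ⊢; omega)).2.2 hg' (p ++ [' '])
            simp only [List.append_assoc, List.cons_append, List.nil_append,
              List.length_append, List.length_cons, List.length_nil] at hA
            refine ⟨?_, ?_, ?_⟩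
            · rw [hA, lastCons c (d :: r') (by simp)]
            · by_cases hstar : c = '*'
              · subst hstar
                have hd : d ≠ '/' := by intro hx; exact hcd ⟨rfl, hx⟩
                rw [refB_star_other d r' hd, lastCons _ _ (neNil_of_last hB)]; exact hB
              · rw [refB_other c (d :: r') hstar, lastCons _ _ (neNil_of_last hB)]; exact hB
            · rw [lastCons _ _ (by simp)]; exact hC

-- ===== VERDICT (by name: the statement is the Claim_ definition above) =====
theorem mask_comments_spec : Claim_unchanged_mask_comments := by
  intro text _ hD
  have hg : mcGood text.toList = true := by
    unfold D_mask_comments at hD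
    cases h : mcGood text.toList with
    | false => exact absurd h hD
    | true => rfl
  have hA := ((mainEquiv text.toList.length text.toList le_rfl).1 hg []).symm
  simp only [List.nil_append, List.length_nil] at hA
  have hB := (mcRun_eq_ref text.toList).1
  unfold mask_comments mask_comments_alt
  rw [hB, ← hA]

theorem mask_comments_changed : Claim_changed_mask_comments := by
  unfold Claim_changed_mask_comments; decide

theorem mask_comments_tight : Claim_exact_mask_comments := by
  intro text _ hD heq
  unfold D_mask_comments at hD
  obtain ⟨hA, hB, hC⟩ := (mainDiff text.toList.length text.toList le_rfl).1 hD []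
  simp only [List.nil_append, List.length_nil] at hA
  have hlist : mcOuter text.toList 0 = refN text.toList := by
    have h := congrArg String.toList heq
    simpa [mask_comments, mask_comments_alt, (mcRun_eq_ref text.toList).1] using h
  rw [hlist, hB] at hA
  exact hC ' ' hA.symm rfl
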